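-- pv_equiv track=rewrite | github.com/JamesZwq/nclique | pivoter/proj1/autotest_out_q2/5468765_q2_autotest.py | _init_for_decomposition
-- ===== SOURCE A (Python) =====
-- def _init_for_decomposition(induced_subgraph):
--     # degree sorted array
--     D = sorted(induced_subgraph.keys(),
--                key=lambda x: len(induced_subgraph[x]))
--
--     # find max degree
--     max_degree = 0
--     if len(D) != 0:
--         for node in D:
--             node_degree = len(induced_subgraph[node])
--             if node_degree > max_degree:
--                 max_degree = node_degree
--     # count number of nodes that each degree has
--     bin_count = [0] * (max_degree + 2)
--     for i in D:
--         bin_count[len(induced_subgraph[i])] += 1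
--     # bin array, compute start position of each degree
--     b = [0] * (max_degree + 2)
--     for i in range(1, max_degree + 1):
--         b[i] = b[i - 1] + bin_count[i - 1]
--
--     # position array, store position of each node in D[]
--     p = {}
--     for i in range(len(D)):
--         p[D[i]] = i
--
--     # degree array, store current degree of each node
--     d = {}
--     for key, value in induced_subgraph.items():
--         d[key] = len(value)
--
--     return D, b, p, d
-- ===== SOURCE B (Python) =====
-- def _init_for_decomposition(induced_subgraph):
--     # degree of each node, in dict order
--     d = {k: len(v) for k, v in induced_subgraph.items()}
--
--     max_degree = max(d.values(), default=0)
--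
--     # group nodes by degree (stable: dict order within each group)
--     groups = {}
--     for node, deg in d.items():
--         groups.setdefault(deg, []).append(node)
--
--     # counting-sort: concatenate the groups by increasing degree,
--     # recording the start position of each degree in b
--     D = []
--     b = [0] * (max_degree + 2)
--     for deg in range(max_degree + 1):
--         b[deg] = len(D)
--         D.extend(groups.get(deg, ()))
--
--     p = {node: i for i, node in enumerate(D)}
--     return D, b, p, d
-- ===== Notes on version B (the rewrite author's own statement) =====
-- stated objective: alternative
-- what changed: Replaces the comparison sort of the nodes by degree with a stable counting/bucket sort (group nodes by degree, concatenate groups in increasing degree order), which also yields the bin-start array b directly as running lengths instead of a separate count+prefix-sum pass.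
import Mathlib
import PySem

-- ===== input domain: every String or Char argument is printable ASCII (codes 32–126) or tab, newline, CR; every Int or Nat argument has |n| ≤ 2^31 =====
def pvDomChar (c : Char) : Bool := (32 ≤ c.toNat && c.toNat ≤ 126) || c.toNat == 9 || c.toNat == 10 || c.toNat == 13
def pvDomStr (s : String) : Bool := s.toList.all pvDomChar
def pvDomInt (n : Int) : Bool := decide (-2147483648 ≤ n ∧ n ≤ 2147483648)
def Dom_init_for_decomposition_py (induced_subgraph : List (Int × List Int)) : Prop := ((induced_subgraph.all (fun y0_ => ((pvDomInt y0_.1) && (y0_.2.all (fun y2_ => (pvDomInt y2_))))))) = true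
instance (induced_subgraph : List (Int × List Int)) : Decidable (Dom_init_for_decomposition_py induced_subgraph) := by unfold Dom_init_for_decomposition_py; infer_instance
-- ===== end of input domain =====

-- B replaces A's comparison sort of the nodes by degree with a stable counting/bucket
-- sort (group by degree, concatenate groups in increasing degree order), obtaining the
-- bin-start array b directly as running lengths instead of a count + prefix-sum pass.

-- ===== PORT A =====
def init_for_decomposition_py (induced_subgraph : List (Int × List Int)) : List Int × List Int × (List (Int × Int)) × (List (Int × Int)) :=
  let g := PySem.Dict.ofList induced_subgraph
  -- D = sorted(induced_subgraph.keys(), key=lambda x: len(induced_subgraph[x]))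
  let D := PySem.List.sorted g.keys (fun x => ((g.getD x []).length : Int))
  -- max_degree = 0; if len(D) != 0: for node in D: ...
  let max_degree : Int :=
    if D.length ≠ 0 then
      D.foldl (fun max_degree node =>
        let node_degree : Int := ((g.getD node []).length : Int)
        if node_degree > max_degree then node_degree else max_degree) 0
    else 0
  -- bin_count = [0]*(max_degree+2); for i in D: bin_count[len(g[i])] += 1
  let bin_count : List Int :=
    D.foldl (fun bc i =>
      PySem.List.pySetD bc ((g.getD i []).length : Int)
        (PySem.List.pyGetD bc ((g.getD i []).length : Int) 0 + 1))
      (List.replicate (max_degree + 2).toNat 0)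
  -- b = [0]*(max_degree+2); for i in range(1, max_degree+1): b[i] = b[i-1] + bin_count[i-1]
  let b : List Int :=
    (PySem.List.pyRange 1 (max_degree + 1) 1).foldl (fun b i =>
      PySem.List.pySetD b i
        (PySem.List.pyGetD b (i - 1) 0 + PySem.List.pyGetD bin_count (i - 1) 0))
      (List.replicate (max_degree + 2).toNat 0)
  -- p = {}; for i in range(len(D)): p[D[i]] = i
  let p : PySem.Dict Int Int :=
    (PySem.List.pyRange 0 (D.length : Int) 1).foldl (fun p i =>
      p.insert (PySem.List.pyGetD D i 0) i) PySem.Dict.empty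
  -- d = {}; for key, value in induced_subgraph.items(): d[key] = len(value)
  let d : PySem.Dict Int Int :=
    g.items.foldl (fun d kv => d.insert kv.1 ((kv.2.length : Int))) PySem.Dict.empty
  (D, b, p.items, d.items)

-- ===== PORT B =====
def init_for_decomposition_py_alt (induced_subgraph : List (Int × List Int)) : List Int × List Int × (List (Int × Int)) × (List (Int × Int)) :=
  let g := PySem.Dict.ofList induced_subgraph
  -- d = {k: len(v) for k, v in induced_subgraph.items()}
  let d : PySem.Dict Int Int :=
    g.items.foldl (fun d kv => d.insert kv.1 ((kv.2.length : Int))) PySem.Dict.empty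
  -- max_degree = max(d.values(), default=0)
  let max_degree : Int := (PySem.List.max? d.values (fun y => y)).getD 0
  -- groups = {}; for node, deg in d.items(): groups.setdefault(deg, []).append(node)
  let groups : PySem.Dict Int (List Int) :=
    d.items.foldl (fun gr kv => gr.modify kv.2 [] (fun l => l ++ [kv.1])) PySem.Dict.empty
  -- D = []; b = [0]*(max_degree+2)
  -- for deg in range(max_degree+1): b[deg] = len(D); D.extend(groups.get(deg, ()))
  let Db : List Int × List Int :=
    (PySem.List.pyRange 0 (max_degree + 1) 1).foldl (fun Db deg =>
      (Db.1 ++ groups.getD deg [], PySem.List.pySetD Db.2 deg ((Db.1.length : Int))))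
      ([], List.replicate (max_degree + 2).toNat 0)
  -- p = {node: i for i, node in enumerate(D)}
  let p : PySem.Dict Int Int :=
    (PySem.List.enumerate Db.1).foldl (fun p iv => p.insert iv.2 iv.1) PySem.Dict.empty
  (Db.1, Db.2, p.items, d.items)

-- ===== PRECONDITION & SPEC =====
def Spec_init_for_decomposition_py (induced_subgraph : List (Int × List Int)) (out : List Int × List Int × (List (Int × Int)) × (List (Int × Int))) : Prop := out = init_for_decomposition_py_alt induced_subgraph
instance (induced_subgraph : List (Int × List Int)) (out : List Int × List Int × (List (Int × Int)) × (List (Int × Int))) : Decidable (Spec_init_for_decomposition_py induced_subgraph out) := by unfold Spec_init_for_decomposition_py; infer_instance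

-- ===== CLAIM (what is proved, stated in full; the proofs are below) =====
def Claim_equal_init_for_decomposition_py : Prop := ∀ (induced_subgraph : List (Int × List Int)), Dom_init_for_decomposition_py induced_subgraph → Spec_init_for_decomposition_py induced_subgraph (init_for_decomposition_py induced_subgraph)

-- ===== LEMMAS AND PROOFS =====

def pvDeg (g : PySem.Dict Int (List Int)) (x : Int) : Int := ((g.getD x []).length : Int)
def pvMu (g : PySem.Dict Int (List Int)) : Int := g.keys.foldl (fun acc x => max acc (pvDeg g x)) 0
theorem pvMu_nonneg (g : PySem.Dict Int (List Int)) : 0 ≤ pvMu g := (PySem.List.le_foldl_max_int g.keys (pvDeg g) 0).1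
theorem pvDeg_le_mu (g : PySem.Dict Int (List Int)) : ∀ x ∈ g.keys, pvDeg g x ≤ pvMu g := (PySem.List.le_foldl_max_int g.keys (pvDeg g) 0).2
theorem pvDeg_nonneg (g : PySem.Dict Int (List Int)) (x : Int) : 0 ≤ pvDeg g x := by simp [pvDeg]

theorem pv_flatMap_congr {α β : Type} {l : List α} {f g : α → List β} (h : ∀ v ∈ l, f v = g v) :
    l.flatMap f = l.flatMap g := by
  induction l with
  | nil => rfl
  | cons a l ih =>
    simp only [List.flatMap_cons, h a (by simp), ih (fun v hv => h v (by simp [hv]))]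

theorem pv_insertBy_append (before : Int → Int → Bool) (x : Int) :
    ∀ (A B : List Int), (∀ a ∈ A, before x a = false) →
      PySem.List.insertBy before x (A ++ B) = A ++ PySem.List.insertBy before x B := by
  intro A
  induction A with
  | nil => intro B _; simp
  | cons a A ih =>
    intro B h
    have ha : before x a = false := h a (by simp)
    simp only [List.cons_append, PySem.List.insertBy, ha]
    simp only [Bool.false_eq_true, if_false]
    rw [ih B (fun a ha => h a (by simp [ha]))]

theorem pv_insertBy_head (before : Int → Int → Bool) (x : Int) (C : List Int)
    (h : ∀ c ∈ C, before x c = true) :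
    PySem.List.insertBy before x C = x :: C := by
  cases C with
  | nil => simp [PySem.List.insertBy]
  | cons c cs =>
    have : before x c = true := h c (by simp)
    simp [PySem.List.insertBy, this]

theorem pv_sorted_eq_flatMap (key : Int → Int) (N : Int) :
    ∀ (xs : List Int), (∀ x ∈ xs, 0 ≤ key x ∧ key x ≤ N) →
      PySem.List.sorted xs key =
        (PySem.List.pyRange 0 (N + 1) 1).flatMap (fun v => xs.filter (fun x => key x == v)) := by
  intro xs
  induction xs using List.reverseRecOn with
  | nil => intro _; simp [PySem.List.sorted]
  | append_singleton xs x ih =>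
    intro h
    have hx := h x (by simp)
    have hxs : ∀ y ∈ xs, 0 ≤ key y ∧ key y ≤ N := fun y hy => h y (by simp [hy])
    have hL : PySem.List.sorted (xs ++ [x]) key =
        PySem.List.insertBy (fun a b => decide (key a < key b)) x (PySem.List.sorted xs key) := by
      rw [PySem.List.sorted_eq_foldl_insertBy, PySem.List.sorted_eq_foldl_insertBy, List.foldl_append]
      simp
    rw [hL, ih hxs]
    have hsplit1 : PySem.List.pyRange 0 (N + 1) 1 =
        PySem.List.pyRange 0 (key x) 1 ++ PySem.List.pyRange (key x) (N + 1) 1 :=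
      PySem.List.pyRange_one_append 0 (key x) (N + 1) hx.1 (by omega)
    have hsplit2 : PySem.List.pyRange (key x) (N + 1) 1 =
        PySem.List.pyRange (key x) (key x + 1) 1 ++ PySem.List.pyRange (key x + 1) (N + 1) 1 :=
      PySem.List.pyRange_one_append (key x) (key x + 1) (N + 1) (by omega) (by omega)
    rw [hsplit1, hsplit2, PySem.List.pyRange_one_singleton]
    simp only [List.flatMap_append, List.flatMap_cons, List.flatMap_nil, List.append_nil]
    set F := xs.filter (fun y => key y == key x) with hF
    set A := (PySem.List.pyRange 0 (key x) 1).flatMap (fun v => xs.filter (fun y => key y == v)) with hA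
    set C := (PySem.List.pyRange (key x + 1) (N + 1) 1).flatMap (fun v => xs.filter (fun y => key y == v)) with hC
    have hAle : ∀ a ∈ A ++ F, decide (key x < key a) = false := by
      intro a ha
      rcases List.mem_append.1 ha with ha | ha
      · rcases List.mem_flatMap.1 ha with ⟨v, hv, hav⟩
        have hv' := PySem.List.mem_pyRange_one.1 hv
        have : key a = v := by simpa using (List.mem_filter.1 hav).2
        simp only [decide_eq_false_iff_not, not_lt]
        omega
      · have : key a = key x := by simpa using (List.mem_filter.1 ha).2
        simp only [decide_eq_false_iff_not, not_lt]
        omega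
    have hCgt : ∀ c ∈ C, decide (key x < key c) = true := by
      intro c hc
      rcases List.mem_flatMap.1 hc with ⟨v, hv, hcv⟩
      have hv' := PySem.List.mem_pyRange_one.1 hv
      have : key c = v := by simpa using (List.mem_filter.1 hcv).2
      simp only [decide_eq_true_eq]
      omega
    have hfib : ∀ v : Int, (xs ++ [x]).filter (fun y => key y == v)
        = xs.filter (fun y => key y == v) ++ (if key x == v then [x] else []) := by
      intro v
      rw [List.filter_append, List.filter_singleton]
      cases hkv : key x == v <;> simp
    have segA : (PySem.List.pyRange 0 (key x) 1).flatMap (fun v => (xs ++ [x]).filter (fun y => key y == v)) = A := by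
      rw [hA]
      apply pv_flatMap_congr
      intro v hv
      have hv' := PySem.List.mem_pyRange_one.1 hv
      rw [hfib v]
      have : (key x == v) = false := by simp; omega
      simp [this]
    have segC : (PySem.List.pyRange (key x + 1) (N + 1) 1).flatMap (fun v => (xs ++ [x]).filter (fun y => key y == v)) = C := by
      rw [hC]
      apply pv_flatMap_congr
      intro v hv
      have hv' := PySem.List.mem_pyRange_one.1 hv
      rw [hfib v]
      have : (key x == v) = false := by simp; omega
      simp [this]
    have segF : (xs ++ [x]).filter (fun y => key y == key x) = F ++ [x] := by
      rw [hfib (key x)]; simp [hF]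
    rw [segA, segC, segF]
    have lhs_eq : PySem.List.insertBy (fun a b => decide (key a < key b)) x (A ++ (F ++ C))
        = A ++ (F ++ (x :: C)) := by
      rw [← List.append_assoc]
      rw [pv_insertBy_append _ _ (A ++ F) C hAle]
      rw [pv_insertBy_head _ _ C hCgt, List.append_assoc]
    rw [lhs_eq]
    simp

theorem pv_countfold_get (key : Int → Int) :
    ∀ (ys : List Int) (bc : List Int), (∀ y ∈ ys, 0 ≤ key y ∧ key y < (bc.length : Int)) →
      ∀ (v : Nat), v < bc.length →
        PySem.List.pyGetD (ys.foldl (fun bc i => PySem.List.pySetD bc (key i) (PySem.List.pyGetD bc (key i) 0 + 1)) bc) (v : Int) 0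
          = PySem.List.pyGetD bc (v : Int) 0 + (ys.countP (fun y => key y == (v : Int)) : Int) := by
  intro ys
  induction ys with
  | nil => intro bc _ v _; simp
  | cons y ys ih =>
    intro bc h v hv
    have hy := h y (by simp)
    set ky := (key y).toNat with hky
    have hkey : key y = (ky : Int) := by omega
    have hkylt : ky < bc.length := by omega
    simp only [List.foldl_cons]
    set bc' := PySem.List.pySetD bc (key y) (PySem.List.pyGetD bc (key y) 0 + 1) with hbc'
    have hlen' : bc'.length = bc.length := PySem.List.length_pySetD bc _ _
    have hrec := ih bc' (by
      intro z hz
      have := h z (by simp [hz])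
      omega) v (by omega)
    rw [hrec]
    have hget' : PySem.List.pyGetD bc' (v : Int) 0
        = if v = ky then PySem.List.pyGetD bc (ky : Int) 0 + 1 else PySem.List.pyGetD bc (v : Int) 0 := by
      rw [hbc', hkey]
      exact PySem.List.pyGetD_pySetD_natCast bc ky v _ 0 hkylt
    rw [hget', List.countP_cons]
    by_cases hvk : v = ky
    · have : (key y == (v : Int)) = true := by simp [hkey, hvk]
      simp [this]
      subst hvk
      omega
    · have : (key y == (v : Int)) = false := by simp [hkey]; omega
      simp [hvk, this]

theorem pv_bloopA (binc : List Int) (M : Nat) (S : Nat → Int) (hS0 : S 0 = 0)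
    (hSstep : ∀ j, j < M + 1 → S (j + 1) = S j + PySem.List.pyGetD binc (j : Int) 0) :
    ∀ (m : Nat), m ≤ M + 1 →
      (PySem.List.pyRange 1 (m : Int) 1).foldl (fun b i =>
          PySem.List.pySetD b i
            (PySem.List.pyGetD b (i - 1) 0 + PySem.List.pyGetD binc (i - 1) 0))
        (List.replicate (M + 2) (0 : Int))
      = (List.range (M + 2)).map (fun j => if j < m then S j else 0) := by
  intro m
  induction m with
  | zero =>
    intro _
    rw [PySem.List.pyRange_one_eq_nil (by omega)]
    simp only [List.foldl_nil]
    apply List.ext_getElem (by simp)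
    intro i h1 h2
    simp [List.getElem_replicate]
  | succ m ih =>
    intro hm
    by_cases hm0 : m = 0
    · subst hm0
      rw [show ((1:Nat) : Int) = 1 by norm_num, PySem.List.pyRange_one_eq_nil (by omega)]
      simp only [List.foldl_nil]
      apply List.ext_getElem (by simp)
      intro i h1 h2
      simp only [List.getElem_replicate, List.getElem_map, List.getElem_range]
      split
      · next hi => interval_cases i; simp [hS0]
      · rfl
    · have h1m : 1 ≤ m := by omega
      have hrange : PySem.List.pyRange 1 ((m + 1 : Nat) : Int) 1
          = PySem.List.pyRange 1 (m : Int) 1 ++ [(m : Int)] := by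
        push_cast
        exact PySem.List.pyRange_one_succ_right (by exact_mod_cast h1m)
      rw [hrange, List.foldl_append, ih (by omega)]
      simp only [List.foldl_cons, List.foldl_nil]
      have hm1 : ((m : Int) - 1) = ((m - 1 : Nat) : Int) := by omega
      have hgetb : PySem.List.pyGetD ((List.range (M + 2)).map (fun j => if j < m then S j else 0)) ((m : Int) - 1) 0 = S (m - 1) := by
        rw [hm1, PySem.List.pyGetD_natCast, PySem.List.getD_map_range _ _ _ _ (by omega)]
        simp only [if_pos (by omega : m - 1 < m)]
      rw [hgetb]
      have hstep := hSstep (m - 1) (by omega)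
      have hm11 : m - 1 + 1 = m := by omega
      rw [hm11] at hstep
      rw [← hm1] at hstep
      rw [← hstep, PySem.List.pySetD_natCast]
      apply List.ext_getElem (by simp)
      intro i hi1 hi2
      simp only [List.getElem_set, List.getElem_map, List.getElem_range]
      by_cases him : i = m
      · simp [him]
      · rw [if_neg (by omega : ¬ m = i)]
        by_cases hilt : i < m
        · rw [if_pos hilt, if_pos (by omega : i < m + 1)]
        · rw [if_neg hilt, if_neg (by omega : ¬ i < m + 1)]

theorem pv_bloopB (grp : Int → List Int) (M : Nat) :
    ∀ (m : Nat), m ≤ M + 1 →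
      ((List.range m).map (fun k : Nat => (k : Int))).foldl (fun Db deg =>
          (Db.1 ++ grp deg, PySem.List.pySetD Db.2 deg ((Db.1.length : Int))))
        ([], List.replicate (M + 2) (0 : Int))
      = ((List.range m).flatMap (fun v : Nat => grp (v : Int)),
         (List.range (M + 2)).map (fun j =>
           if j < m then (((List.range j).flatMap (fun v : Nat => grp (v : Int))).length : Int) else 0)) := by
  intro m
  induction m with
  | zero =>
    intro _
    simp only [List.range_zero, List.map_nil, List.foldl_nil, List.flatMap_nil]
    refine Prod.ext ?_ ?_
    · rfl
    · apply List.ext_getElem (by simp)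
      intro i h1 h2
      simp
  | succ m ih =>
    intro hm
    rw [List.range_succ, List.map_append, List.foldl_append, ih (by omega)]
    simp only [List.map_cons, List.map_nil, List.foldl_cons, List.foldl_nil]
    refine Prod.ext ?_ ?_
    · rw [List.flatMap_append]
      simp
    · rw [PySem.List.pySetD_natCast]
      apply List.ext_getElem (by simp)
      intro i hi1 hi2
      simp only [List.getElem_set, List.getElem_map, List.getElem_range]
      by_cases him : m = i
      · subst him
        rw [if_pos rfl, if_pos (by omega)]
      · rw [if_neg him]
        by_cases hilt : i < m
        · rw [if_pos hilt, if_pos (by omega : i < m + 1)]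
        · rw [if_neg hilt, if_neg (by omega : ¬ i < m + 1)]


theorem pv_d_items (g : PySem.Dict Int (List Int)) (hnd : g.keys.Nodup) :
    (g.items.foldl (fun d kv => PySem.Dict.insert d kv.1 ((kv.2.length : Int))) PySem.Dict.empty).items
      = g.items.map (fun kv => (kv.1, (kv.2.length : Int))) := by
  have h := PySem.Dict.items_foldl_insert_fresh g.items (fun kv => kv.1)
    (fun kv => ((kv.2.length : Int))) PySem.Dict.empty
    (by intro a _; simp) (by simpa [PySem.Dict.keys] using hnd)
  simpa using h

theorem pv_deg_item (g : PySem.Dict Int (List Int)) (hnd : g.keys.Nodup) :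
    ∀ kv ∈ g.items, pvDeg g kv.1 = ((kv.2.length : Int)) := by
  rintro ⟨k, v⟩ hkv
  simp only [pvDeg]
  rw [PySem.Dict.getD_of_mem_items g hkv hnd []]

theorem pv_maxA (g : PySem.Dict Int (List Int)) (D : List Int) (hperm : D.Perm g.keys) :
    (if D.length ≠ 0 then
      D.foldl (fun max_degree node =>
        if ((g.getD node []).length : Int) > max_degree then ((g.getD node []).length : Int) else max_degree) 0
    else 0) = pvMu g := by
  have hfun : (fun (max_degree node : Int) =>
      if ((g.getD node []).length : Int) > max_degree then ((g.getD node []).length : Int) else max_degree)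
      = (fun acc x => max acc (pvDeg g x)) := by
    funext md node
    simp only [pvDeg]
    split_ifs with h
    · exact (max_eq_right (le_of_lt h)).symm
    · exact (max_eq_left (by omega)).symm
  rw [hfun]
  haveI : RightCommutative (fun (acc x : Int) => max acc (pvDeg g x)) :=
    ⟨fun b a1 a2 => by rw [max_assoc, max_comm (pvDeg g a1), ← max_assoc]⟩
  by_cases hD : D.length = 0
  · have hDnil : D = [] := List.length_eq_zero_iff.1 hD
    have hknil : g.keys = [] := (hDnil ▸ hperm).nil_eq.symm
    rw [if_neg (by omega : ¬ D.length ≠ 0), pvMu, hknil]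
    rfl
  · rw [if_pos hD]
    exact hperm.foldl_eq 0

theorem pv_maxB (g : PySem.Dict Int (List Int)) (hnd : g.keys.Nodup) :
    (PySem.List.max? (g.items.foldl (fun d kv => PySem.Dict.insert d kv.1 ((kv.2.length : Int))) PySem.Dict.empty).values (fun y => y)).getD 0 = pvMu g := by
  have hvals : (g.items.foldl (fun d kv => PySem.Dict.insert d kv.1 ((kv.2.length : Int))) PySem.Dict.empty).values
      = g.items.map (fun kv => ((kv.2.length : Int))) := by
    simp only [PySem.Dict.values, pv_d_items g hnd, List.map_map]
    rfl
  rw [hvals]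
  cases hL : g.items with
  | nil =>
    have hknil : g.keys = [] := by simp [PySem.Dict.keys, hL]
    simp [PySem.List.max?, pvMu, hknil]
  | cons kv0 rest =>
    have hkv0 : kv0 ∈ g.items := by rw [hL]; exact List.mem_cons_self
    simp only [List.map_cons, PySem.List.max?_id_cons, Option.getD_some]
    rw [pvMu, PySem.Dict.keys, hL]
    simp only [List.map_cons, List.foldl_cons, List.foldl_map]
    rw [show max 0 (pvDeg g kv0.1) = pvDeg g kv0.1 from max_eq_right (pvDeg_nonneg g kv0.1)]
    rw [pv_deg_item g hnd kv0 hkv0]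
    symm
    apply PySem.List.foldl_congr_mem
    intro acc kv hkv
    rw [pv_deg_item g hnd kv (by rw [hL]; exact List.mem_cons_of_mem _ hkv)]

theorem pv_grp (g : PySem.Dict Int (List Int)) (hnd : g.keys.Nodup) (v : Int) :
    ((g.items.foldl (fun d kv => PySem.Dict.insert d kv.1 ((kv.2.length : Int))) PySem.Dict.empty).items.foldl
        (fun gr kv => gr.modify kv.2 [] (fun l => l ++ [kv.1])) PySem.Dict.empty).getD v []
      = g.keys.filter (fun x => pvDeg g x == v) := by
  rw [pv_d_items g hnd]
  have h1 : (g.items.map (fun kv => (kv.1, (kv.2.length : Int)))).foldl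
        (fun gr kv => gr.modify kv.2 [] (fun l => l ++ [kv.1])) PySem.Dict.empty
      = (g.items.map (fun kv => ((kv.2.length : Int), kv.1))).foldl
        (fun gr p => gr.modify p.1 [] (fun l => l ++ [p.2])) PySem.Dict.empty := by
    rw [List.foldl_map, List.foldl_map]
  rw [h1, PySem.Dict.getD_foldl_modify_append]
  simp only [PySem.Dict.getD_empty, List.nil_append]
  rw [List.filter_map, List.map_map, PySem.Dict.keys, List.filter_map]
  simp only [Function.comp_def]
  have hpred : ∀ kv ∈ g.items, (((kv.2.length : Int)) == v) = (pvDeg g kv.1 == v) := by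
    intro kv hkv; rw [pv_deg_item g hnd kv hkv]
  rw [List.filter_congr hpred]

theorem pv_p (D : List Int) (hndD : D.Nodup) :
    ((PySem.List.pyRange 0 (D.length : Int) 1).foldl (fun p i =>
        p.insert (PySem.List.pyGetD D i 0) i) PySem.Dict.empty).items
    = ((PySem.List.enumerate D).foldl (fun p iv => p.insert iv.2 iv.1) PySem.Dict.empty).items := by
  have hmapA : (PySem.List.pyRange 0 (D.length : Int) 1).map (fun i => PySem.List.pyGetD D i 0) = D :=
    PySem.List.map_pyGetD_pyRange_zero' D 0
  have hA := PySem.Dict.items_foldl_insert_fresh (PySem.List.pyRange 0 (D.length : Int) 1)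
    (fun i => PySem.List.pyGetD D i 0) (fun i => i) PySem.Dict.empty
    (by intro a _; simp) (by rw [hmapA]; exact hndD)
  have hmapB : (PySem.List.enumerate D).map (fun iv => iv.2) = D := PySem.List.map_snd_enumerate D 0
  have hB := PySem.Dict.items_foldl_insert_fresh (PySem.List.enumerate D)
    (fun iv => iv.2) (fun iv => iv.1) PySem.Dict.empty
    (by intro a _; simp) (by rw [hmapB]; exact hndD)
  rw [hA, hB]
  rw [PySem.List.enumerate_eq_map_pyRange D 0, List.map_map]
  simp [Function.comp_def]


theorem pv_countfold_get_g (g : PySem.Dict Int (List Int)) :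
    ∀ (ys : List Int) (bc : List Int), (∀ y ∈ ys, 0 ≤ ((g.getD y []).length : Int) ∧ ((g.getD y []).length : Int) < (bc.length : Int)) →
      ∀ (v : Nat), v < bc.length →
        PySem.List.pyGetD (ys.foldl (fun bc i => PySem.List.pySetD bc ((g.getD i []).length : Int) (PySem.List.pyGetD bc ((g.getD i []).length : Int) 0 + 1)) bc) (v : Int) 0
          = PySem.List.pyGetD bc (v : Int) 0 + (ys.countP (fun y => ((g.getD y []).length : Int) == (v : Int)) : Int) :=
  pv_countfold_get (fun i => ((g.getD i []).length : Int))

theorem pv_bloopB_g (groups : PySem.Dict Int (List Int)) (M : Nat) :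
    ∀ (m : Nat), m ≤ M + 1 →
      ((List.range m).map (fun k : Nat => (k : Int))).foldl (fun Db deg =>
          (Db.1 ++ groups.getD deg [], PySem.List.pySetD Db.2 deg ((Db.1.length : Int))))
        ([], List.replicate (M + 2) (0 : Int))
      = ((List.range m).flatMap (fun v : Nat => groups.getD (v : Int) []),
         (List.range (M + 2)).map (fun j =>
           if j < m then (((List.range j).flatMap (fun v : Nat => groups.getD (v : Int) [])).length : Int) else 0)) :=
  pv_bloopB (fun deg => groups.getD deg []) M

theorem pv_main (xs : List (Int × List Int)) :
    init_for_decomposition_py xs = init_for_decomposition_py_alt xs := by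
  unfold init_for_decomposition_py init_for_decomposition_py_alt
  set g := PySem.Dict.ofList xs with hg
  have hnd : g.keys.Nodup := PySem.Dict.nodup_keys_ofList xs
  have h0mu := pvMu_nonneg g
  dsimp only
  set D := PySem.List.sorted g.keys (fun x => ((g.getD x []).length : Int)) with hD
  have hperm : D.Perm g.keys := PySem.List.sorted_perm _ _ _
  have hndD : D.Nodup := (hperm.nodup_iff).2 hnd
  rw [pv_maxA g D hperm, pv_maxB g hnd]
  set dd := List.foldl (fun d kv => PySem.Dict.insert d kv.1 ((kv.2.length : Int))) PySem.Dict.empty g.items with hdd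
  set groups := List.foldl (fun gr kv => PySem.Dict.modify gr kv.2 [] (fun l => l ++ [kv.1])) PySem.Dict.empty dd.items with hgroups
  have hgrp : ∀ v : Int, groups.getD v [] = g.keys.filter (fun x => ((g.getD x []).length : Int) == v) := by
    intro v
    rw [hgroups, hdd]
    simpa [pvDeg] using pv_grp g hnd v
  have hmu2 : (pvMu g + 2).toNat = (pvMu g).toNat + 2 := by omega
  have hmu1 : pvMu g + 1 = (((pvMu g).toNat + 1 : Nat) : Int) := by omega
  rw [hmu2, hmu1, PySem.List.pyRange_zero_natCast ((pvMu g).toNat + 1)]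
  rw [pv_bloopB_g groups ((pvMu g).toNat) ((pvMu g).toNat + 1) le_rfl]
  dsimp only
  have hDeq : D = (List.range ((pvMu g).toNat + 1)).flatMap (fun v : Nat => groups.getD (v : Int) []) := by
    rw [hD, pv_sorted_eq_flatMap (fun x => ((g.getD x []).length : Int)) (pvMu g) g.keys
        (fun x hx => ⟨Int.natCast_nonneg _, pvDeg_le_mu g x hx⟩)]
    rw [hmu1, PySem.List.pyRange_zero_natCast ((pvMu g).toNat + 1), List.flatMap_map]
    exact pv_flatMap_congr (fun v _ => (hgrp (v : Int)).symm)
  set binc := List.foldl (fun bc i => PySem.List.pySetD bc ((g.getD i []).length : Int)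
      (PySem.List.pyGetD bc ((g.getD i []).length : Int) 0 + 1))
      (List.replicate ((pvMu g).toNat + 2) (0 : Int)) D with hbinc
  have hbound : ∀ y ∈ D, 0 ≤ ((g.getD y []).length : Int) ∧
      ((g.getD y []).length : Int) < ((List.replicate ((pvMu g).toNat + 2) (0 : Int)).length : Int) := by
    intro y hy
    have hy' : y ∈ g.keys := (PySem.List.mem_sorted _ _ _ _).1 hy
    have hle := pvDeg_le_mu g y hy'
    simp only [pvDeg] at hle
    simp only [List.length_replicate]
    refine ⟨Int.natCast_nonneg _, ?_⟩
    push_cast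
    omega
  have hread : ∀ j : Nat, j < (pvMu g).toNat + 2 →
      PySem.List.pyGetD binc (j : Int) 0 = (D.countP (fun y => ((g.getD y []).length : Int) == (j : Int)) : Int) := by
    intro j hj
    rw [hbinc, pv_countfold_get_g g D _ hbound j (by simpa using hj)]
    rw [PySem.List.pyGetD_natCast, List.getD_replicate _ hj]
    simp
  have hcnt : ∀ j : Nat, (D.countP (fun y => ((g.getD y []).length : Int) == (j : Int)) : Int)
      = ((groups.getD (j : Int) []).length : Int) := by
    intro j
    rw [List.Perm.countP_eq _ hperm, hgrp ((j : Nat) : Int), List.countP_eq_length_filter]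
  have hS0 : ((List.flatMap (fun v : Nat => groups.getD (v : Int) []) (List.range 0)).length : Int) = 0 := by
    simp
  have hSstep : ∀ j, j < (pvMu g).toNat + 1 →
      ((List.flatMap (fun v : Nat => groups.getD (v : Int) []) (List.range (j + 1))).length : Int)
        = ((List.flatMap (fun v : Nat => groups.getD (v : Int) []) (List.range j)).length : Int)
          + PySem.List.pyGetD binc (j : Int) 0 := by
    intro j hj
    rw [hread j (by omega), hcnt j]
    simp only [List.range_succ, List.flatMap_append, List.flatMap_cons, List.flatMap_nil,
      List.append_nil, List.length_append]
    push_cast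
    ring
  rw [pv_bloopA binc ((pvMu g).toNat)
      (fun j => ((List.flatMap (fun v : Nat => groups.getD (v : Int) []) (List.range j)).length : Int))
      hS0 hSstep ((pvMu g).toNat + 1) le_rfl]
  rw [← hDeq]
  rw [pv_p D hndD]

-- ===== VERDICT (by name: the statement is the Claim_ definition above) =====
theorem init_for_decomposition_py_spec : Claim_equal_init_for_decomposition_py := by
  intro xs _
  unfold Spec_init_for_decomposition_py
  exact pv_main xs
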